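-- pv_equiv track=rewrite | github.com/miliar/Code_Jam_Webscraper | solutions_python/solutions_year17_round0_nr3/136.py | answer
-- ===== SOURCE A (Python) =====
-- import queue
--
-- def answer(n, k):
--     intervals = queue.PriorityQueue()
--     intervals.put_nowait(-n)
--     counts = {n: 1}
--     k_rem = k
--
--     while not intervals.empty():
--         interval = -intervals.get_nowait()
--         count = counts[interval]
--         left_interval, right_interval = (interval - 1) // 2, interval // 2
--
--         if count >= k_rem:
--             return right_interval, left_interval
--         k_rem -= count
--
--         del counts[interval]
--         for sub_interval in (left_interval, right_interval):
--             if sub_interval not in counts: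
--                 intervals.put_nowait(-sub_interval)
--                 counts[sub_interval] = 0
--             counts[sub_interval] += count
-- ===== SOURCE B (Python) =====
-- def answer(n, k):
--     # Same splitting process, but the PriorityQueue is dropped: the dict of
--     # interval sizes is the only state, and the largest size is found by max(d).
--     d = {n: 1}
--     while d:
--         size = max(d)
--         count = d.pop(size)
--         if count >= k:
--             return size // 2, (size - 1) // 2
--         k -= count
--         for s in ((size - 1) // 2, size // 2):
--             d[s] = d.get(s, 0) + count
-- ===== Notes on version B (the rewrite author's own statement) =====
-- stated objective: simpler
-- what changed: The explicit PriorityQueue plus a parallel counts dict (two synchronized structures with membership guards before each push) is replaced by a single dict keyed by interval size, popping the largest key with max(d) each round, which removes the queue, the k_rem shadow variable and the not-in-counts bookkeeping.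
import Mathlib
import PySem

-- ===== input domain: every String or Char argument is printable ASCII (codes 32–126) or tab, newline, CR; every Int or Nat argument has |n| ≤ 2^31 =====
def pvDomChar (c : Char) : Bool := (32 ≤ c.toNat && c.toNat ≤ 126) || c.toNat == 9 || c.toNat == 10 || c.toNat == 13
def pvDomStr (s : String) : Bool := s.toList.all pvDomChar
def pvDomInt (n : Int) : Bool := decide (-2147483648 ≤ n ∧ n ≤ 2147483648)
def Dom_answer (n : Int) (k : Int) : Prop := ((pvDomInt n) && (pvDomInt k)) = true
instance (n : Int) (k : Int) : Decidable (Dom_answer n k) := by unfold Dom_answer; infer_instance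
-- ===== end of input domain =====

-- B drops A's PriorityQueue: the counts dict alone is the state and the largest
-- interval is taken with max over its keys (objective: simpler; same results).

-- ===== PORT A =====
-- the body of A's 'for sub_interval in (left_interval, right_interval)' loop:
-- membership-guarded push onto the queue, then counts[sub_interval] += count
def answerSubA (count : Int) (st : List Int × PySem.Dict Int Int) (sub : Int) :
    List Int × PySem.Dict Int Int :=
  let q := st.1
  let c := st.2
  let qc := if c.contains sub then (q, c) else (q ++ [-sub], c.insert sub 0)
  (qc.1, qc.2.insert sub (qc.2.getD sub 0 + count))

-- A's while loop; the PriorityQueue of negated intervals is a list popped at its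
-- minimum (PySem.List.min?).  fuel only makes the recursion structural; the loop
-- returns long before it runs out (k_rem drops by count ≥ 1 every round).
-- Python returns None when the queue empties; that branch is unreachable
-- (sub-intervals are always pushed back), (0, 0) stands in for it.
def answerLoopA : Nat → List Int → PySem.Dict Int Int → Int → Int × Int
  | 0, _, _, _ => (0, 0)
  | fuel+1, intervals, counts, k_rem =>
    match PySem.List.min? intervals (fun x => x) with
    | none => (0, 0)
    | some m =>
      let interval := -m
      let intervals' := intervals.erase m
      let count := counts.getD interval 0
      let left_interval := PySem.Int.floordiv (interval - 1) 2
      let right_interval := PySem.Int.floordiv interval 2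
      if count ≥ k_rem then (right_interval, left_interval)
      else
        let counts' := counts.erase interval
        let st1 := answerSubA count (intervals', counts') left_interval
        let st2 := answerSubA count st1 right_interval
        answerLoopA fuel st2.1 st2.2 (k_rem - count)

def answer (n : Int) (k : Int) : Int × Int :=
  answerLoopA (k.toNat + 2) [-n] (PySem.Dict.empty.insert n 1) k

-- ===== PORT B =====
-- B's while loop: the dict is the whole state, size = max(d), count = d.pop(size),
-- then d[s] = d.get(s, 0) + count for both halves.  Same fuel guard as A's port.
def answerLoopB : Nat → PySem.Dict Int Int → Int → Int × Int
  | 0, _, _ => (0, 0)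
  | fuel+1, d, k =>
    match PySem.List.max? d.keys (fun x => x) with
    | none => (0, 0)
    | some size =>
      let count := d.getD size 0
      let d1 := d.erase size
      if count ≥ k then
        (PySem.Int.floordiv size 2, PySem.Int.floordiv (size - 1) 2)
      else
        let s1 := PySem.Int.floordiv (size - 1) 2
        let d2 := d1.insert s1 (d1.getD s1 0 + count)
        let s2 := PySem.Int.floordiv size 2
        let d3 := d2.insert s2 (d2.getD s2 0 + count)
        answerLoopB fuel d3 (k - count)

def answer_alt (n : Int) (k : Int) : Int × Int :=
  answerLoopB (k.toNat + 2) (PySem.Dict.empty.insert n 1) k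

-- ===== PRECONDITION & SPEC =====
def Spec_answer (n : Int) (k : Int) (out : Int × Int) : Prop := out = answer_alt n k
instance (n : Int) (k : Int) (out : Int × Int) : Decidable (Spec_answer n k out) := by unfold Spec_answer; infer_instance

-- ===== CLAIM (what is proved, stated in full; the proofs are below) =====
def Claim_equal_answer : Prop := ∀ (n : Int) (k : Int), Dom_answer n k → Spec_answer n k (answer n k)

-- ===== LEMMAS AND PROOFS =====

-- the min of the negated key list is the negated max of the keys
-- (both sides are PySem's first-extremal foldl scans)
theorem min?_map_neg (l : List Int) :
    PySem.List.min? (l.map (fun x => -x)) (fun x => x)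
      = (PySem.List.max? l (fun x => x)).map (fun x => -x) := by
  show List.foldl _ ((none : Option Int).map (fun x => -x)) _ = _
  unfold PySem.List.max?
  generalize (none : Option Int) = a
  induction l generalizing a with
  | nil => cases a <;> rfl
  | cons x t ih =>
    cases a with
    | none => simpa using ih (some x)
    | some m =>
      by_cases h : m < x
      · have h' : -x < -m := by omega
        simp only [List.map_cons, List.foldl_cons, Option.map_some, if_pos h, if_pos h']
        simpa using ih (some x)
      · have h' : ¬ (-x < -m) := by omega
        simp only [List.map_cons, List.foldl_cons, Option.map_some, if_neg h, if_neg h']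
        simpa using ih (some m)

-- keys of Dict.erase are List.erase of the keys, given Nodup keys
theorem keys_erase_of_nodup (d : PySem.Dict Int Int) (a : Int) (h : d.keys.Nodup) :
    (d.erase a).keys = d.keys.erase a := by
  rw [h.erase_eq_filter]
  show (d.items.filter (fun p => !p.1 == a)).map (fun x => x.1)
     = (d.items.map (fun x => x.1)).filter (fun x => x != a)
  induction d.items with
  | nil => rfl
  | cons p t ih =>
    by_cases h : p.1 = a <;> simp [h, ih]

theorem nodup_keys_erase (d : PySem.Dict Int Int) (a : Int) (h : d.keys.Nodup) :
    (d.erase a).keys.Nodup := by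
  rw [keys_erase_of_nodup d a h]; exact h.erase a

-- one pass of A's inner for-loop body: the dict becomes B's single insert,
-- and the queue stays exactly the negated key list
theorem subA_spec (count sub : Int) (q : List Int) (c : PySem.Dict Int Int)
    (hq : q = c.keys.map (fun x => -x)) :
    answerSubA count (q, c) sub
      = ((c.insert sub (c.getD sub 0 + count)).keys.map (fun x => -x),
         c.insert sub (c.getD sub 0 + count)) := by
  unfold answerSubA
  by_cases h : c.contains sub
  · simp only [h, if_pos]
    have hk := PySem.Dict.keys_insert_of_contains c (c.getD sub 0 + count) h
    simp [hk, hq]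
  · have hb : c.contains sub = false := by simpa using h
    simp only [hb, Bool.false_eq_true, if_neg, not_false_iff]
    have h0 : c.getD sub 0 = 0 := PySem.Dict.getD_of_not_contains c 0 hb
    have hg : (c.insert sub 0).getD sub 0 = 0 := PySem.Dict.getD_insert_self c sub 0 0
    have hii : (c.insert sub 0).insert sub count = c.insert sub (c.getD sub 0 + count) := by
      rw [PySem.Dict.insert_insert_self, h0, zero_add]
    have hk : (c.insert sub (c.getD sub 0 + count)).keys = c.keys ++ [sub] :=
      PySem.Dict.keys_insert_of_not_contains c _ hb
    simp [hg, hii, hk, hq]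

-- the loop invariant: A's queue is the negated key list of the shared dict,
-- so with the same fuel the two loops coincide step by step
theorem loopA_eq_loopB (fuel : Nat) : ∀ (c : PySem.Dict Int Int) (kr : Int), c.keys.Nodup →
    answerLoopA fuel (c.keys.map (fun x => -x)) c kr = answerLoopB fuel c kr := by
  induction fuel with
  | zero => intro c kr _; rfl
  | succ f ih =>
    intro c kr hnd
    simp only [answerLoopA, answerLoopB, min?_map_neg]
    cases hmax : PySem.List.max? c.keys (fun x => x) with
    | none => rfl
    | some M =>
      simp only [Option.map_some, neg_neg]
      have he : (c.keys.map (fun x => -x)).erase (-M) = (c.erase M).keys.map (fun x => -x) := by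
        rw [keys_erase_of_nodup c M hnd,
          List.map_erase (neg_injective : Function.Injective (fun x : Int => -x))]
      by_cases hc : c.getD M 0 ≥ kr
      · simp [hc]
      · simp only [hc, if_neg, not_false_iff]
        rw [he]
        rw [subA_spec _ _ _ _ rfl, subA_spec _ _ _ _ rfl]
        exact ih _ _ (PySem.Dict.nodup_keys_insert _ _ _
          (PySem.Dict.nodup_keys_insert _ _ _ (nodup_keys_erase c M hnd)))

-- ===== VERDICT (by name: the statement is the Claim_ definition above) =====
theorem answer_spec : Claim_equal_answer := by
  intro n k _
  unfold Spec_answer answer answer_alt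
  have hnd : (PySem.Dict.empty.insert n (1 : Int)).keys.Nodup :=
    PySem.Dict.nodup_keys_insert _ _ _ PySem.Dict.nodup_keys_empty
  have hk : (PySem.Dict.empty.insert n (1 : Int)).keys = [n] := by
    simp [PySem.Dict.keys_insert_of_not_contains _ _ (PySem.Dict.contains_empty n)]
  have := loopA_eq_loopB (k.toNat + 2) (PySem.Dict.empty.insert n 1) k hnd
  rw [hk] at this
  simpa using this
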